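-- pv_equiv track=rewrite | github.com/pdGruby/cloupy | diagrams/walter_lieth.py | get_max_ytick_for_precipitation
-- ===== SOURCE A (Python) =====
-- def get_max_ytick_for_precipitation(precipitation):
--     """Return the highest tick for precipitation for the upper axis in WL graph"""
--
--     available_ticks = [200, 300, 400, 500, 600,
--                        700, 800, 900, 1000, 1100,
--                        1200, 1300, 1400, 1500, 1600,
--                        1700, 1800, 1900, 2000]
--     max_tick = max(list(precipitation))
--
--     for tick in available_ticks:
--         if tick >= max_tick:
--             return tick
--     raise Exception(f"Precipitation is too high! {max_tick}")
-- ===== SOURCE B (Python) =====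
-- def get_max_ytick_for_precipitation(precipitation):
--     """Return the highest tick for precipitation for the upper axis in WL graph"""
--     max_tick = max(list(precipitation))
--     tick = max(200, -(-max_tick // 100) * 100)  # round up to next multiple of 100, at least 200
--     if tick > 2000:
--         raise Exception(f"Precipitation is too high! {max_tick}")
--     return tick
-- ===== Notes on version B (the rewrite author's own statement) =====
-- stated objective: simpler
-- what changed: Replaces the scan over the 19-entry hard-coded tick ladder with a closed-form integer ceiling-to-the-next-100 (clamped below at 200), keeping the same too-high exception.
import Mathlib
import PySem

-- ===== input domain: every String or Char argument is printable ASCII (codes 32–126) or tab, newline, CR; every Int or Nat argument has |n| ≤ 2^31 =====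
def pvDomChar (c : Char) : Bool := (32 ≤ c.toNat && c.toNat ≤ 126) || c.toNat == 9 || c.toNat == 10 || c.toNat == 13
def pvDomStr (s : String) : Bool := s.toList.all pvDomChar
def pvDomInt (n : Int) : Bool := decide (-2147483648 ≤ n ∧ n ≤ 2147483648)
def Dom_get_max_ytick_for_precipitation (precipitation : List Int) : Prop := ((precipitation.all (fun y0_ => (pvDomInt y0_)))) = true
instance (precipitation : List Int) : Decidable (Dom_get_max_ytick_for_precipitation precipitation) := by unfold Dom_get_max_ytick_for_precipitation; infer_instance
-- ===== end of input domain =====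

-- B replaces A's linear scan of the 19-entry tick ladder by a closed-form
-- ceiling-to-the-next-100 computation (objective: simpler); equivalence is about
-- the return value on inputs where A returns normally (Pre_ below).

-- ===== PORT A =====
-- A's for-loop over available_ticks with early return; 0 = the unreachable
-- (under Pre_) raise / empty-max ValueError.
def scanTicksA (m : Int) : List Int → Int
  | [] => 0
  | t :: ts => if t ≥ m then t else scanTicksA m ts

def get_max_ytick_for_precipitation (precipitation : List Int) : Int :=
  match PySem.List.max? precipitation (fun y => y) with
  | none => 0
  | some m =>
      scanTicksA m [200, 300, 400, 500, 600, 700, 800, 900, 1000, 1100,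
                    1200, 1300, 1400, 1500, 1600, 1700, 1800, 1900, 2000]

-- ===== PORT B =====
def get_max_ytick_for_precipitation_alt (precipitation : List Int) : Int :=
  match PySem.List.max? precipitation (fun y => y) with
  | none => 0
  | some m => max 200 ((-(PySem.Int.floordiv (-m) 100)) * 100)

-- ===== PRECONDITION & SPEC =====
-- Pre_ excludes exactly the inputs where A raises: the empty list (max → ValueError)
-- and lists whose maximum exceeds 2000 (A's explicit 'Precipitation is too high!' raise).
def Pre_get_max_ytick_for_precipitation (precipitation : List Int) : Prop :=
  precipitation ≠ [] ∧ ∀ x ∈ precipitation, x ≤ 2000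
instance (precipitation : List Int) : Decidable (Pre_get_max_ytick_for_precipitation precipitation) := by
  unfold Pre_get_max_ytick_for_precipitation; infer_instance

def pvWitness_get_max_ytick_for_precipitation : List Int := [35, 540, 120]

def Spec_get_max_ytick_for_precipitation (precipitation : List Int) (out : Int) : Prop :=
  out = get_max_ytick_for_precipitation_alt precipitation
instance (precipitation : List Int) (out : Int) : Decidable (Spec_get_max_ytick_for_precipitation precipitation out) := by
  unfold Spec_get_max_ytick_for_precipitation; infer_instance

-- ===== CLAIM (what is proved, stated in full; the proofs are below) =====
def Claim_equal_get_max_ytick_for_precipitation : Prop :=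
  ∀ (precipitation : List Int), Dom_get_max_ytick_for_precipitation precipitation →
    Pre_get_max_ytick_for_precipitation precipitation →
    Spec_get_max_ytick_for_precipitation precipitation (get_max_ytick_for_precipitation precipitation)

-- ===== LEMMAS AND PROOFS =====

-- On the fixed ladder, A's first-tick-≥ m scan equals B's ceiling formula, for m ≤ 2000.
set_option maxHeartbeats 2000000 in
theorem scanTicksA_eq_ceil (m : Int) (hm : m ≤ 2000) :
    scanTicksA m [200, 300, 400, 500, 600, 700, 800, 900, 1000, 1100,
                  1200, 1300, 1400, 1500, 1600, 1700, 1800, 1900, 2000]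
      = max 200 ((-(PySem.Int.floordiv (-m) 100)) * 100) := by
  rw [PySem.Int.floordiv_eq_ediv_of_pos (by norm_num : (0:Int) < 100)]
  rw [scanTicksA, scanTicksA, scanTicksA, scanTicksA, scanTicksA, scanTicksA, scanTicksA, scanTicksA, scanTicksA, scanTicksA, scanTicksA, scanTicksA, scanTicksA, scanTicksA, scanTicksA, scanTicksA, scanTicksA, scanTicksA, scanTicksA]
  by_cases h0 : (200:Int) ≥ m
  · rw [if_pos h0]; omega
  rw [if_neg h0]
  by_cases h1 : (300:Int) ≥ m
  · rw [if_pos h1]; omega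
  rw [if_neg h1]
  by_cases h2 : (400:Int) ≥ m
  · rw [if_pos h2]; omega
  rw [if_neg h2]
  by_cases h3 : (500:Int) ≥ m
  · rw [if_pos h3]; omega
  rw [if_neg h3]
  by_cases h4 : (600:Int) ≥ m
  · rw [if_pos h4]; omega
  rw [if_neg h4]
  by_cases h5 : (700:Int) ≥ m
  · rw [if_pos h5]; omega
  rw [if_neg h5]
  by_cases h6 : (800:Int) ≥ m
  · rw [if_pos h6]; omega
  rw [if_neg h6]
  by_cases h7 : (900:Int) ≥ m
  · rw [if_pos h7]; omega
  rw [if_neg h7]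
  by_cases h8 : (1000:Int) ≥ m
  · rw [if_pos h8]; omega
  rw [if_neg h8]
  by_cases h9 : (1100:Int) ≥ m
  · rw [if_pos h9]; omega
  rw [if_neg h9]
  by_cases h10 : (1200:Int) ≥ m
  · rw [if_pos h10]; omega
  rw [if_neg h10]
  by_cases h11 : (1300:Int) ≥ m
  · rw [if_pos h11]; omega
  rw [if_neg h11]
  by_cases h12 : (1400:Int) ≥ m
  · rw [if_pos h12]; omega
  rw [if_neg h12]
  by_cases h13 : (1500:Int) ≥ m
  · rw [if_pos h13]; omega
  rw [if_neg h13]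
  by_cases h14 : (1600:Int) ≥ m
  · rw [if_pos h14]; omega
  rw [if_neg h14]
  by_cases h15 : (1700:Int) ≥ m
  · rw [if_pos h15]; omega
  rw [if_neg h15]
  by_cases h16 : (1800:Int) ≥ m
  · rw [if_pos h16]; omega
  rw [if_neg h16]
  by_cases h17 : (1900:Int) ≥ m
  · rw [if_pos h17]; omega
  rw [if_neg h17]
  by_cases h18 : (2000:Int) ≥ m
  · rw [if_pos h18]; omega
  rw [if_neg h18]
  omega

-- ===== VERDICT (by name: the statement is the Claim_ definition above) =====
theorem get_max_ytick_for_precipitation_spec : Claim_equal_get_max_ytick_for_precipitation := by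
  intro p _ hpre
  unfold Spec_get_max_ytick_for_precipitation
  unfold get_max_ytick_for_precipitation get_max_ytick_for_precipitation_alt
  cases hmax : PySem.List.max? p (fun y => y) with
  | none => rfl
  | some m =>
      exact scanTicksA_eq_ceil m (hpre.2 m (PySem.List.max?_mem hmax))
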